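-- pv_equiv track=rewrite | github.com/Ryane-S/Swarm_Project | src/team_of_the_south/geometry.py | detect_local_zones
-- ===== SOURCE A (Python) =====
-- def detect_local_zones(liste, max_value=150, max_diff=50, min_zone_length=2):
--     zones = []
--     current_zone = []
--
--     for i in range(len(liste)):
--         val = liste[i]
--
--         if val > max_value:
--             if len(current_zone) >= min_zone_length:
--                 zones.append(current_zone)
--             current_zone = []
--             continue
--
--         if not current_zone:
--             current_zone.append(i)
--         else:
--             prev_val = liste[current_zone[-1]]
--             if abs(val - prev_val) <= max_diff:
--                 current_zone.append(i)
--             else: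
--                 if len(current_zone) >= min_zone_length:
--                     zones.append(current_zone)
--                 current_zone = [i]
--
--     if len(current_zone) >= min_zone_length:
--         zones.append(current_zone)
--
--     return zones
-- ===== SOURCE B (Python) =====
-- def detect_local_zones(liste, max_value=150, max_diff=50, min_zone_length=2):
--     # Pass 1: cut the list into maximal runs of (index, value) pairs with
--     # value <= max_value; values > max_value are discarded separators.
--     runs = []
--     run = []
--     for i, v in enumerate(liste):
--         if v <= max_value:
--             run.append((i, v))
--         else:
--             if run:
--                 runs.append(run)
--             run = []
--     if run:
--         runs.append(run)
--
--     # Pass 2: split every run into sub-segments at consecutive jumps > max_diff.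
--     segments = []
--     for run in runs:
--         seg = [run[0]]
--         prev = run[0]
--         for cur in run[1:]:
--             if abs(cur[1] - prev[1]) <= max_diff:
--                 seg.append(cur)
--             else:
--                 segments.append(seg)
--                 seg = [cur]
--             prev = cur
--         segments.append(seg)
--
--     # Pass 3: length filter, keep the original indices.
--     return [[i for i, _ in seg] for seg in segments if len(seg) >= min_zone_length]
-- ===== Notes on version B (the rewrite author's own statement) =====
-- stated objective: alternative
-- what changed: A's single stateful index loop (flush/extend/reset current_zone while scanning) is replaced by a three-stage pipeline: split the enumerated list into maximal runs of values <= max_value, then split each run at consecutive jumps > max_diff, then filter segments by length and project the indices.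
-- outside the precondition, e.g. on detect_local_zones([200], 150, 50, 0): A returns [[], []], B returns []; on detect_local_zones([], 150, 50, 0): A returns [[]], B returns []
import Mathlib
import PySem

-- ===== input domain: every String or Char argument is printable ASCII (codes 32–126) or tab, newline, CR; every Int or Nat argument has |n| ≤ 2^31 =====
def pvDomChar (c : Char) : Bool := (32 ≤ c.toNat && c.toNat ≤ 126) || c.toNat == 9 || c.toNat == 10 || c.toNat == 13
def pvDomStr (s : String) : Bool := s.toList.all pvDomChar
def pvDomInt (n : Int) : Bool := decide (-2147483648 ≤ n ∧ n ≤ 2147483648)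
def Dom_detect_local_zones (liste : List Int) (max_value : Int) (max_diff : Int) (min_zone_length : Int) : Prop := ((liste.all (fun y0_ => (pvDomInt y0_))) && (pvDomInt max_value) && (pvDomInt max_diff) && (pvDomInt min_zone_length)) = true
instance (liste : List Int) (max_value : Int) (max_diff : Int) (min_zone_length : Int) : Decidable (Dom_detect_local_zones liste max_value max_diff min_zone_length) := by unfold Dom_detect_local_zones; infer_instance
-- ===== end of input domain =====

-- B replaces A's single stateful scan by a run-split / diff-split / length-filter pipeline (alternative decomposition, same cost).


-- ===== PORT A =====
-- the body of A's `for i in range(len(liste))` loop, on state (zones, current_zone)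
def dlz_stepA (liste : List Int) (max_value : Int) (max_diff : Int) (min_zone_length : Int)
    (st : List (List Int) × List Int) (i : Int) : List (List Int) × List Int :=
  let zones := st.1
  let cz := st.2
  let val := PySem.List.pyGetD liste i 0   -- liste[i]; i ∈ range(len(liste)) is always in range
  if val > max_value then
    (if min_zone_length ≤ (cz.length : Int) then zones ++ [cz] else zones, [])
  else if cz = [] then
    (zones, cz ++ [i])
  else
    -- liste[current_zone[-1]]; current_zone is nonempty here and holds in-range indices
    let prev_val := PySem.List.pyGetD liste (PySem.List.pyGetD cz (-1) 0) 0
    if |val - prev_val| ≤ max_diff then (zones, cz ++ [i])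
    else (if min_zone_length ≤ (cz.length : Int) then zones ++ [cz] else zones, [i])

-- A's code after the loop: flush current_zone if long enough
def dlz_flushA (min_zone_length : Int) (st : List (List Int) × List Int) : List (List Int) :=
  if min_zone_length ≤ (st.2.length : Int) then st.1 ++ [st.2] else st.1

def detect_local_zones (liste : List Int) (max_value : Int) (max_diff : Int) (min_zone_length : Int) : List (List Int) :=
  dlz_flushA min_zone_length
    ((PySem.List.pyRange 0 (liste.length : Int) 1).foldl
      (dlz_stepA liste max_value max_diff min_zone_length) ([], []))

-- ===== PORT B =====
-- pass-1 loop body: accumulate (runs, current run) over enumerate(liste)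
def dlz_stepB (max_value : Int) (st : List (List (Int × Int)) × List (Int × Int)) (p : Int × Int) :
    List (List (Int × Int)) × List (Int × Int) :=
  if p.2 ≤ max_value then (st.1, st.2 ++ [p])
  else (if st.2 = [] then st.1 else st.1 ++ [st.2], [])

-- pass-2 inner loop: split one run at jumps > max_diff, carrying (prev, seg)
def dlz_splitGo (max_diff : Int) (prev : Int × Int) (seg : List (Int × Int)) :
    List (Int × Int) → List (List (Int × Int))
  | [] => [seg]
  | cur :: rest =>
    if |cur.2 - prev.2| ≤ max_diff then dlz_splitGo max_diff cur (seg ++ [cur]) rest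
    else seg :: dlz_splitGo max_diff cur [cur] rest

def dlz_splitRun (max_diff : Int) : List (Int × Int) → List (List (Int × Int))
  | [] => []                 -- runs are never empty
  | p :: rest => dlz_splitGo max_diff p [p] rest

-- pass-1 epilogue: append the trailing run if nonempty
def dlz_finishRuns (st : List (List (Int × Int)) × List (Int × Int)) : List (List (Int × Int)) :=
  if st.2 = [] then st.1 else st.1 ++ [st.2]

def detect_local_zones_alt (liste : List Int) (max_value : Int) (max_diff : Int) (min_zone_length : Int) : List (List Int) :=
  (((dlz_finishRuns ((PySem.List.enumerate liste 0).foldl (dlz_stepB max_value) ([], []))).flatMap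
      (dlz_splitRun max_diff)).filter
    (fun s => min_zone_length ≤ (s.length : Int))).map (fun s => s.map Prod.fst)

-- ===== PRECONDITION & SPEC =====
-- Pre_ excludes nonpositive min_zone_length, outside the parameter's natural domain: there a length-0
-- zone passes A's `len >= min_zone_length` test, so A emits empty lists as zones at separators and at
-- the end of the list — a degenerate artefact B's pipeline (zones built only from kept elements) never produces.
def Pre_detect_local_zones (liste : List Int) (max_value : Int) (max_diff : Int) (min_zone_length : Int) : Prop :=
  1 ≤ min_zone_length
instance (liste : List Int) (max_value : Int) (max_diff : Int) (min_zone_length : Int) : Decidable (Pre_detect_local_zones liste max_value max_diff min_zone_length) := by unfold Pre_detect_local_zones; infer_instance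

def pvWitness_detect_local_zones : List Int × Int × Int × Int := ([10, 20, 200, 30, 100], 150, 50, 2)

def Spec_detect_local_zones (liste : List Int) (max_value : Int) (max_diff : Int) (min_zone_length : Int) (out : List (List Int)) : Prop := out = detect_local_zones_alt liste max_value max_diff min_zone_length
instance (liste : List Int) (max_value : Int) (max_diff : Int) (min_zone_length : Int) (out : List (List Int)) : Decidable (Spec_detect_local_zones liste max_value max_diff min_zone_length out) := by unfold Spec_detect_local_zones; infer_instance

-- ===== CLAIM (what is proved, stated in full; the proofs are below) =====
def Claim_equal_detect_local_zones : Prop := ∀ (liste : List Int) (max_value : Int) (max_diff : Int) (min_zone_length : Int), Dom_detect_local_zones liste max_value max_diff min_zone_length → Pre_detect_local_zones liste max_value max_diff min_zone_length → Spec_detect_local_zones liste max_value max_diff min_zone_length (detect_local_zones liste max_value max_diff min_zone_length)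

-- ===== LEMMAS AND PROOFS =====

-- A's loop replayed on (index, value) pairs
def pvGoA (mv md mz : Int) (zones : List (List Int)) (cz : List (Int × Int)) :
    List (Int × Int) → List (List Int)
  | [] => if mz ≤ (cz.length : Int) then zones ++ [cz.map Prod.fst] else zones
  | p :: ps =>
    if p.2 > mv then pvGoA mv md mz (if mz ≤ (cz.length : Int) then zones ++ [cz.map Prod.fst] else zones) [] ps
    else if cz = [] then pvGoA mv md mz zones [p] ps
    else if |p.2 - (cz.getLast?.getD (0, 0)).2| ≤ md then pvGoA mv md mz zones (cz ++ [p]) ps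
    else pvGoA mv md mz (if mz ≤ (cz.length : Int) then zones ++ [cz.map Prod.fst] else zones) [p] ps

-- the interleaved segment stream A produces (before the length filter)
def pvSegs (mv md : Int) (cz : List (Int × Int)) : List (Int × Int) → List (List (Int × Int))
  | [] => if cz = [] then [] else [cz]
  | p :: ps =>
    if p.2 > mv then (if cz = [] then [] else [cz]) ++ pvSegs mv md [] ps
    else if cz = [] then pvSegs mv md [p] ps
    else if |p.2 - (cz.getLast?.getD (0, 0)).2| ≤ md then pvSegs mv md (cz ++ [p]) ps
    else cz :: pvSegs mv md [p] ps

-- B's pass-1 as a recursion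
def pvRuns (mv : Int) (run : List (Int × Int)) : List (Int × Int) → List (List (Int × Int))
  | [] => if run = [] then [] else [run]
  | p :: ps => if p.2 ≤ mv then pvRuns mv (run ++ [p]) ps
               else (if run = [] then [] else [run]) ++ pvRuns mv [] ps

-- bridge: mid-run continuation of B's split
def pvRunCont (mv md : Int) (prev : Int × Int) (seg : List (Int × Int)) :
    List (Int × Int) → List (List (Int × Int))
  | [] => [seg]
  | p :: ps =>
    if p.2 > mv then seg :: (pvRuns mv [] ps).flatMap (dlz_splitRun md)
    else if |p.2 - prev.2| ≤ md then pvRunCont mv md p (seg ++ [p]) ps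
    else seg :: pvRunCont mv md p [p] ps

-- B's pass-3
def pvPost (mz : Int) (segs : List (List (Int × Int))) : List (List Int) :=
  (segs.filter (fun s => mz ≤ (s.length : Int))).map (fun s => s.map Prod.fst)

theorem pvPost_nil (mz : Int) : pvPost mz [] = [] := rfl

theorem pvPost_append (mz : Int) (a b : List (List (Int × Int))) :
    pvPost mz (a ++ b) = pvPost mz a ++ pvPost mz b := by
  simp [pvPost, List.filter_append]

theorem pvPost_cons (mz : Int) (s : List (Int × Int)) (b : List (List (Int × Int))) :
    pvPost mz (s :: b) = (if mz ≤ (s.length : Int) then [s.map Prod.fst] else []) ++ pvPost mz b := by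
  simp [pvPost, List.filter_cons]; split_ifs <;> simp

-- A's fold over indices equals pvGoA on the pairs, given the lookup invariant
theorem la (liste : List Int) (mv md mz : Int) :
    ∀ (ps : List (Int × Int)) (zones : List (List Int)) (cz : List (Int × Int)),
      (∀ p ∈ ps, PySem.List.pyGetD liste p.1 0 = p.2) →
      (∀ p ∈ cz, PySem.List.pyGetD liste p.1 0 = p.2) →
      dlz_flushA mz ((ps.map Prod.fst).foldl (dlz_stepA liste mv md mz) (zones, cz.map Prod.fst))
        = pvGoA mv md mz zones cz ps := by
  intro ps
  induction ps with
  | nil => intro zones cz _ _; simp [pvGoA, dlz_flushA]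
  | cons p ps ih =>
    intro zones cz hps hcz
    obtain ⟨i, v⟩ := p
    have hv : PySem.List.pyGetD liste i 0 = v := hps (i, v) (List.mem_cons_self ..)
    have hps' : ∀ q ∈ ps, PySem.List.pyGetD liste q.1 0 = q.2 := fun q hq => hps q (List.mem_cons_of_mem _ hq)
    simp only [List.map_cons, List.foldl_cons]
    by_cases h1 : v > mv
    · rw [show dlz_stepA liste mv md mz (zones, cz.map Prod.fst) i
          = ((if mz ≤ (cz.length : Int) then zones ++ [cz.map Prod.fst] else zones), ([] : List (Int × Int)).map Prod.fst) by
        simp [dlz_stepA, hv, h1]]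
      rw [ih _ _ hps' (by simp)]
      simp only [pvGoA, if_pos h1]
    · by_cases h2 : cz = []
      · rw [show dlz_stepA liste mv md mz (zones, cz.map Prod.fst) i
            = (zones, [(i, v)].map Prod.fst) by
          simp [dlz_stepA, hv, h1, h2]]
        rw [ih _ _ hps' (by intro q hq; simp at hq; subst hq; exact hv)]
        simp only [pvGoA, if_neg h1, if_pos h2]
      · have hne : cz.map Prod.fst ≠ [] := by simpa using h2
        have hgl : cz.getLast? = some (cz.getLast h2) := List.getLast?_eq_some_getLast h2
        have hlast : PySem.List.pyGetD (cz.map Prod.fst) (-1) 0 = (cz.getLast h2).1 := by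
          rw [PySem.List.pyGetD_neg_one _ _ hne, List.getLast_map]
        have hmem : cz.getLast h2 ∈ cz := List.getLast_mem h2
        have hprev : PySem.List.pyGetD liste (PySem.List.pyGetD (cz.map Prod.fst) (-1) 0) 0
            = (cz.getLast?.getD (0, 0)).2 := by
          rw [hlast, hcz _ hmem, hgl]
          rfl
        by_cases h3 : |v - (cz.getLast?.getD (0, 0)).2| ≤ md
        · rw [show dlz_stepA liste mv md mz (zones, cz.map Prod.fst) i
              = (zones, (cz ++ [(i, v)]).map Prod.fst) by
            simp only [dlz_stepA, hv, hprev]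
            simp [h1, h3, hne]]
          rw [ih _ _ hps' (by
            intro q hq
            rcases List.mem_append.mp hq with h | h
            · exact hcz q h
            · simp at h; subst h; exact hv)]
          simp only [pvGoA, if_neg h1, if_neg h2, if_pos h3]
        · rw [show dlz_stepA liste mv md mz (zones, cz.map Prod.fst) i
              = ((if mz ≤ (cz.length : Int) then zones ++ [cz.map Prod.fst] else zones), [(i, v)].map Prod.fst) by
            simp only [dlz_stepA, hv, hprev]
            simp [h1, h3, hne]]
          rw [ih _ _ hps' (by intro q hq; simp at hq; subst hq; exact hv)]
          simp only [pvGoA, if_neg h1, if_neg h2, if_neg h3]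

-- pvGoA with the length filter pulled out into pvPost (needs 1 ≤ mz)
theorem lb1 (mv md mz : Int) (hmz : 1 ≤ mz) :
    ∀ (ps : List (Int × Int)) (zones : List (List Int)) (cz : List (Int × Int)),
      pvGoA mv md mz zones cz ps = zones ++ pvPost mz (pvSegs mv md cz ps) := by
  intro ps
  induction ps with
  | nil =>
    intro zones cz
    by_cases h : cz = []
    · subst h; simp [pvGoA, pvSegs, pvPost]; omega
    · simp only [pvGoA, pvSegs, if_neg h, pvPost_cons, pvPost_nil]
      split_ifs <;> simp
  | cons p ps ih =>
    intro zones cz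
    by_cases h1 : p.2 > mv
    · by_cases h2 : cz = []
      · subst h2
        simp only [pvGoA, pvSegs, if_pos h1, ih]
        simp; omega
      · simp only [pvGoA, pvSegs, if_pos h1, ih, if_neg h2]
        rw [pvPost_append, pvPost_cons, pvPost_nil]
        split_ifs <;> simp
    · by_cases h2 : cz = []
      · simp only [pvGoA, pvSegs, if_neg h1, if_pos h2, ih]
      · by_cases h3 : |p.2 - (cz.getLast?.getD (0, 0)).2| ≤ md
        · simp only [pvGoA, pvSegs, if_neg h1, if_neg h2, if_pos h3, ih]
        · simp only [pvGoA, pvSegs, if_neg h1, if_neg h2, if_neg h3, ih]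
          rw [pvPost_cons]
          split_ifs <;> simp

-- BIG: runs-then-split equals the mid-run continuation, under the split-prefix hypothesis
theorem lbig (mv md : Int) :
    ∀ (ps run : List (Int × Int)) (done : List (List (Int × Int))) (prev : Int × Int) (seg : List (Int × Int)),
      run ≠ [] →
      (∀ ys, dlz_splitRun md (run ++ ys) = done ++ dlz_splitGo md prev seg ys) →
      (pvRuns mv run ps).flatMap (dlz_splitRun md) = done ++ pvRunCont mv md prev seg ps := by
  intro ps
  induction ps with
  | nil =>
    intro run done prev seg hrun H
    simp only [pvRuns, if_neg hrun, List.flatMap_cons, List.flatMap_nil, List.append_nil, pvRunCont]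
    simpa [dlz_splitGo] using H []
  | cons p ps ih =>
    intro run done prev seg hrun H
    by_cases h1 : p.2 ≤ mv
    · by_cases h3 : |p.2 - prev.2| ≤ md
      · have H' : ∀ ys, dlz_splitRun md ((run ++ [p]) ++ ys) = done ++ dlz_splitGo md p (seg ++ [p]) ys := by
          intro ys
          rw [List.append_assoc, List.singleton_append, H (p :: ys)]
          simp [dlz_splitGo, h3]
        simp only [pvRuns, if_pos h1, pvRunCont, if_neg (by omega : ¬ p.2 > mv), if_pos h3]
        exact ih (run ++ [p]) done p (seg ++ [p]) (by simp) H'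
      · have H' : ∀ ys, dlz_splitRun md ((run ++ [p]) ++ ys) = (done ++ [seg]) ++ dlz_splitGo md p [p] ys := by
          intro ys
          rw [List.append_assoc, List.singleton_append, H (p :: ys)]
          simp [dlz_splitGo, h3]
        simp only [pvRuns, if_pos h1, pvRunCont, if_neg (by omega : ¬ p.2 > mv), if_neg h3]
        rw [ih (run ++ [p]) (done ++ [seg]) p [p] (by simp) H']
        simp
    · simp only [pvRuns, if_neg h1, if_neg hrun, pvRunCont, if_pos (by omega : p.2 > mv)]
      rw [List.flatMap_append, List.flatMap_cons, List.flatMap_nil, List.append_nil]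
      have : dlz_splitRun md run = done ++ [seg] := by simpa [dlz_splitGo] using H []
      rw [this]
      simp

-- combined strong induction: pvSegs from an empty / nonempty current segment
theorem lpq (mv md : Int) :
    ∀ (n : Nat) (ps : List (Int × Int)), ps.length ≤ n →
      (pvSegs mv md [] ps = (pvRuns mv [] ps).flatMap (dlz_splitRun md)) ∧
      (∀ (seg : List (Int × Int)) (prev : Int × Int), seg ≠ [] → seg.getLast? = some prev →
        pvSegs mv md seg ps = pvRunCont mv md prev seg ps) := by
  intro n
  induction n with
  | zero =>
    intro ps hps
    have : ps = [] := List.eq_nil_of_length_eq_zero (Nat.le_zero.mp hps)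
    subst this
    constructor
    · simp [pvSegs, pvRuns]
    · intro seg prev hseg _; simp [pvSegs, pvRunCont, hseg]
  | succ n ih =>
    intro ps hps
    cases ps with
    | nil =>
      constructor
      · simp [pvSegs, pvRuns]
      · intro seg prev hseg _; simp [pvSegs, pvRunCont, hseg]
    | cons p ps =>
      have hlen : ps.length ≤ n := by simpa using hps
      constructor
      · by_cases h1 : p.2 > mv
        · simp only [pvSegs, if_pos h1, pvRuns, if_neg (by omega : ¬ p.2 ≤ mv)]
          rw [(ih ps hlen).1]
          simp
        · simp only [pvSegs, if_neg h1, if_pos rfl, pvRuns, if_pos (by omega : p.2 ≤ mv)]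
          rw [(ih ps hlen).2 [p] p (by simp) (by simp)]
          exact (lbig mv md ps [p] [] p [p] (by simp) (fun ys => by simp [dlz_splitRun])).symm
      · intro seg prev hseg hlast
        by_cases h1 : p.2 > mv
        · simp only [pvSegs, if_pos h1, if_neg hseg, pvRunCont, if_pos h1]
          rw [(ih ps hlen).1]
          simp
        · have hprev : (seg.getLast?.getD (0, 0)).2 = prev.2 := by
            rw [hlast]; rfl
          by_cases h3 : |p.2 - prev.2| ≤ md
          · simp only [pvSegs, pvRunCont, if_neg h1, if_neg hseg, hprev, if_pos h3]
            exact (ih ps hlen).2 (seg ++ [p]) p (by simp) (by simp)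
          · simp only [pvSegs, pvRunCont, if_neg h1, if_neg hseg, hprev, if_neg h3]
            rw [(ih ps hlen).2 [p] p (by simp) (by simp)]

-- B's pass-1 fold equals pvRuns
theorem lr (mv : Int) :
    ∀ (ps : List (Int × Int)) (runs : List (List (Int × Int))) (run : List (Int × Int)),
      dlz_finishRuns (ps.foldl (dlz_stepB mv) (runs, run)) = runs ++ pvRuns mv run ps := by
  intro ps
  induction ps with
  | nil =>
    intro runs run
    simp only [List.foldl_nil, pvRuns, dlz_finishRuns]
    split_ifs <;> simp
  | cons p ps ih =>
    intro runs run
    by_cases h1 : p.2 ≤ mv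
    · simp only [List.foldl_cons, dlz_stepB, if_pos h1, pvRuns, ih]
    · simp only [List.foldl_cons, dlz_stepB, if_neg h1, pvRuns, ih]
      split_ifs <;> simp

-- ===== VERDICT (by name: the statement is the Claim_ definition above) =====
theorem detect_local_zones_spec : Claim_equal_detect_local_zones := by
  intro liste mv md mz _ hpre
  unfold Spec_detect_local_zones detect_local_zones detect_local_zones_alt
  have hlookup : ∀ p ∈ PySem.List.enumerate liste 0, PySem.List.pyGetD liste p.1 0 = p.2 := by
    intro p hp
    rcases (PySem.List.mem_enumerate_iff liste 0 p).mp hp with ⟨k, hk, rfl⟩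
    simp [PySem.List.pyGetD_natCast, List.getElem?_eq_getElem hk]
  have hrange : (PySem.List.enumerate liste 0).map Prod.fst = PySem.List.pyRange 0 (liste.length : Int) 1 := by
    rw [PySem.List.map_fst_enumerate]; norm_num
  have hA := la liste mv md mz (PySem.List.enumerate liste 0) [] [] hlookup (by simp)
  simp only [List.map_nil] at hA
  rw [← hrange, hA, lb1 mv md mz hpre, (lpq mv md (PySem.List.enumerate liste 0).length _ le_rfl).1,
      lr mv (PySem.List.enumerate liste 0) [] []]
  simp [pvPost]
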